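-- pv_equiv track=rewrite | github.com/MelaRay/ARGs_through_RL | Codages.py | Blocs1
-- ===== SOURCE A (Python) =====
-- ALL_marqueurs = [0,1,9]
--
-- def Blocs1(dictEtatS, k):
--     d = len(ALL_marqueurs) #nbr total blocs differents
--     etatS = [0] * k * d
--
--     for seq1 in dictEtatS: #pour chaque sequence etat s
--         for j in range(d): #pour chaque bloc j possible
--             i = 0
--             #on verifie si bloc position p de seq1 est egal au bloc j
--             for p in range(k):
--                 if (seq1[i] == ALL_marqueurs[j]):
--                     etatS[j*k + p] = etatS[j*k + p] + dictEtatS[seq1]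
--
--                 i = i + 1
--
--     return etatS
-- ===== SOURCE B (Python) =====
-- ALL_marqueurs = [0, 1, 9]
--
-- def Blocs1(dictEtatS, k):
--     # one pass over items(); inner marker loop replaced by a precomputed index table
--     marqueur_idx = {v: j for j, v in enumerate(ALL_marqueurs)}
--     etatS = [0] * (k * len(ALL_marqueurs))
--     for seq, poids in dictEtatS.items():
--         for p in range(k):
--             j = marqueur_idx.get(seq[p])
--             if j is not None:
--                 etatS[j * k + p] += poids
--     return etatS
-- ===== Notes on version B (the rewrite author's own statement) =====
-- stated objective: simpler
-- what changed: Replaces A's inner loop over all markers (and its redundant hand-maintained index i and repeated dict lookups) by a precomputed value-to-index table, so each sequence is scanned once per position with a direct table lookup; Pre_ excludes inputs where seq[p] raises IndexError (a key shorter than k with k>0) and duplicate-key association lists, which cannot arise from a Python dict.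
import Mathlib
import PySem

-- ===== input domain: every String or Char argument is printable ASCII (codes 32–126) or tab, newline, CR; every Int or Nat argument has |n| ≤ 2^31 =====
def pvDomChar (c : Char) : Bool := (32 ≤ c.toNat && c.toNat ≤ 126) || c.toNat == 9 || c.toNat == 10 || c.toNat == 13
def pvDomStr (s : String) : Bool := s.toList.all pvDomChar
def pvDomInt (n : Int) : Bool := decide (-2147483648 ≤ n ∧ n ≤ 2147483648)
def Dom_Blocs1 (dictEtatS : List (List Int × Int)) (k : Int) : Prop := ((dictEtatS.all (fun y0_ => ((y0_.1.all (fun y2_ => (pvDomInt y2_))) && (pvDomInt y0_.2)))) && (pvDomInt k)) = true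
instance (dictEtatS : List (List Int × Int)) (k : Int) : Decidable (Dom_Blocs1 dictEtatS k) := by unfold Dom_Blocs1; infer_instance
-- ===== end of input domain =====

-- B replaces A's inner marker loop, hand-maintained counter i and repeated dict lookups by a
-- precomputed value→index table and a single pass per sequence (objective: simpler).

-- ===== PORT A =====
def pvALLmarqueurs : List Int := [0, 1, 9]

-- dictEtatS[seq1]: first-match lookup; the `none` default 0 is unreachable since seq1 is a key
def pvDictVal (d : List (List Int × Int)) (key : List Int) : Int :=
  match d.find? (fun pr => pr.1 == key) with
  | some pr => pr.2
  | none => 0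

def Blocs1 (dictEtatS : List (List Int × Int)) (k : Int) : List Int :=
  let d := pvALLmarqueurs.length
  -- etatS = [0] * k * d
  let etatS : List Int := List.replicate (k.toNat * d) 0
  dictEtatS.foldl (fun etatS pr =>
    let seq1 := pr.1
    (List.range d).foldl (fun etatS j =>
      -- i = 0; for p in range(k): …; i = i + 1   (state = (etatS, i));
      -- seq1[i] and the write etatS[j*k+p] are in range under Pre_ (getD/set are exact there)
      ((List.range k.toNat).foldl (fun st (p : Nat) =>
        (if seq1.getD st.2 0 == pvALLmarqueurs.getD j 0 then
           st.1.set ((( j : Int) * k + (p : Int)).toNat)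
             (st.1.getD (((j : Int) * k + (p : Int)).toNat) 0 + pvDictVal dictEtatS seq1)
         else st.1,
         st.2 + 1)) (etatS, 0)).1) etatS) etatS

-- ===== PORT B =====
-- marqueur_idx = {v: j for j, v in enumerate(ALL_marqueurs)}
def pvMarqueurIdx : PySem.Dict Int Int :=
  (PySem.List.enumerate ([0, 1, 9] : List Int)).foldl
    (fun d pr => PySem.Dict.insert d pr.2 pr.1) PySem.Dict.empty

def Blocs1_alt (dictEtatS : List (List Int × Int)) (k : Int) : List Int :=
  -- etatS = [0] * (k * len(ALL_marqueurs)); seq[p] and the write are in range under Pre_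
  let etatS : List Int := List.replicate ((k * (([0, 1, 9] : List Int).length : Int)).toNat) 0
  dictEtatS.foldl (fun etatS pr =>
    (List.range k.toNat).foldl (fun etatS (p : Nat) =>
      match PySem.Dict.get? pvMarqueurIdx (pr.1.getD p 0) with
      | some j => etatS.set ((j * k + (p : Int)).toNat)
                    (etatS.getD ((j * k + (p : Int)).toNat) 0 + pr.2)
      | none => etatS) etatS) etatS

-- ===== PRECONDITION & SPEC =====
-- Pre_ excludes (a) keys shorter than k with k > 0, on which A raises IndexError at seq1[i],
-- and (b) duplicate-key association lists, which cannot arise from a Python dict (the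
-- first-match weight A's lookup would reuse there is an artifact of the representation).
def Pre_Blocs1 (dictEtatS : List (List Int × Int)) (k : Int) : Prop :=
  (dictEtatS.map Prod.fst).Nodup ∧ ∀ pr ∈ dictEtatS, k ≤ (pr.1.length : Int)

instance (dictEtatS : List (List Int × Int)) (k : Int) : Decidable (Pre_Blocs1 dictEtatS k) := by
  unfold Pre_Blocs1; infer_instance

def pvWitness_Blocs1 : (List (List Int × Int)) × Int := ([([0, 9], 2), ([1, 5], 3)], 2)

def Spec_Blocs1 (dictEtatS : List (List Int × Int)) (k : Int) (out : List Int) : Prop := out = Blocs1_alt dictEtatS k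
instance (dictEtatS : List (List Int × Int)) (k : Int) (out : List Int) : Decidable (Spec_Blocs1 dictEtatS k out) := by unfold Spec_Blocs1; infer_instance

-- ===== CLAIM (what is proved, stated in full; the proofs are below) =====
def Claim_equal_Blocs1 : Prop := ∀ (dictEtatS : List (List Int × Int)) (k : Int), Dom_Blocs1 dictEtatS k → Pre_Blocs1 dictEtatS k → Spec_Blocs1 dictEtatS k (Blocs1 dictEtatS k)

-- ===== LEMMAS AND PROOFS =====

-- 'etat[i] += w' as one operation; both ports' updates are definitionally of this shape
def pvAdd (l : List Int) (i : Nat) (w : Int) : List Int := l.set i (l.getD i 0 + w)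

-- the per-(marker j, position p) step at weight w for sequence seq; both loop bodies reduce
-- to folds of this step, in different orders over the same (j, p) pairs
def pvStep (k w : Int) (seq : List Int) (e : List Int) (jp : Nat × Nat) : List Int :=
  if seq.getD jp.2 0 == ([0, 1, 9] : List Int).getD jp.1 0
  then pvAdd e (((jp.1 : Int) * k + (jp.2 : Int)).toNat) w else e

lemma pvAdd_comm (l : List Int) (i i' : Nat) (a b : Int) :
    pvAdd (pvAdd l i a) i' b = pvAdd (pvAdd l i' b) i a := by
  unfold pvAdd
  by_cases h : i = i'
  · subst h
    rcases Nat.lt_or_ge i l.length with hi | hi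
    · simp [List.getD_eq_getElem?_getD, hi, List.set_set]
      ring_nf
    · simp [List.set_eq_of_length_le hi]
  · simp only [List.getD_eq_getElem?_getD, List.getElem?_set_ne h, List.getElem?_set_ne (Ne.symm h)]
    exact List.set_comm _ _ h

lemma pvStep_rightComm (k w : Int) (seq : List Int) (e : List Int) (x y : Nat × Nat) :
    pvStep k w seq (pvStep k w seq e x) y = pvStep k w seq (pvStep k w seq e y) x := by
  unfold pvStep; split_ifs <;> simp [pvAdd_comm]

-- collapse A's hand-maintained counter i (always equal to the loop position p)
lemma pv_foldl_counter {α : Type} (f : α → Nat → Nat → α) :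
    ∀ (n s : Nat) (e : α),
      (List.range' s n).foldl (fun st p => (f st.1 st.2 p, st.2 + 1)) (e, s)
        = ((List.range' s n).foldl (fun e' p => f e' p p) e, s + n) := by
  intro n
  induction n with
  | zero => intro s e; simp
  | succ m ih =>
      intro s e
      rw [List.range'_succ]
      simp only [List.foldl_cons]
      rw [ih (s + 1)]
      refine Prod.ext rfl (by omega)

-- foldl over a flatMap is the nested foldl
lemma pv_foldl_flatMap {α β γ : Type} (f : α → γ → α) (g : β → List γ) :
    ∀ (l : List β) (e : α),
      (l.flatMap g).foldl f e = l.foldl (fun e b => (g b).foldl f e) e := by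
  intro l
  induction l with
  | nil => intro e; simp
  | cons x xs ih => intro e; simp [List.flatMap_cons, List.foldl_append, ih]

def pvPairsA (kn : Nat) : List (Nat × Nat) :=
  (List.range 3).flatMap (fun j => (List.range kn).map (fun p => (j, p)))

def pvPairsB (kn : Nat) : List (Nat × Nat) :=
  (List.range kn).flatMap (fun p => [(0, p), (1, p), (2, p)])

-- A visits the (j, p) grid marker-major, B position-major: the two orders are a permutation
lemma pvPairs_perm (kn : Nat) : (pvPairsA kn).Perm (pvPairsB kn) := by
  have hA : pvPairsA kn = (List.range 3) ×ˢ (List.range kn) := rfl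
  have hB : pvPairsB kn = ((List.range kn) ×ˢ (List.range 3)).map Prod.swap := by
    simp only [SProd.sprod, List.product, List.map_flatMap, List.map_map]
    rfl
  rw [hA, hB]
  apply List.perm_of_nodup_nodup_toFinset_eq
  · exact (List.nodup_range).product (List.nodup_range)
  · exact ((List.nodup_range).product (List.nodup_range)).map Prod.swap_injective
  · ext x
    rw [List.mem_toFinset, List.mem_toFinset, List.mem_product, List.mem_map]
    constructor
    · rintro ⟨h1, h2⟩
      exact ⟨(x.2, x.1), List.mem_product.mpr ⟨h2, h1⟩, by simp⟩
    · rintro ⟨⟨a, b⟩, hm, h3⟩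
      obtain ⟨h1, h2⟩ := List.mem_product.mp hm
      simp only [Prod.swap_prod_mk] at h3
      subst h3
      exact ⟨h2, h1⟩

-- with distinct keys, A's first-match lookup returns the pair's own weight
lemma pv_lookup_eq_of_nodup (d : List (List Int × Int)) (pr : List Int × Int)
    (hnd : (d.map Prod.fst).Nodup) (hm : pr ∈ d) : pvDictVal d pr.1 = pr.2 := by
  induction d with
  | nil => cases hm
  | cons q qs ih =>
      simp only [List.map_cons, List.nodup_cons] at hnd
      rcases List.mem_cons.mp hm with hm | hm
      · subst hm; simp [pvDictVal]
      · have hne : ¬ (q.1 == pr.1) = true := by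
          simp only [beq_iff_eq]
          intro h
          exact hnd.1 (h ▸ List.mem_map_of_mem hm)
        simpa [pvDictVal, List.find?, hne] using ih hnd.2 hm

-- B's body at one position = the three marker steps in a row
lemma pvB_pos (k w : Int) (seq : List Int) (e : List Int) (p : Nat) :
    (match PySem.Dict.get? pvMarqueurIdx (seq.getD p 0) with
     | some j => e.set ((j * k + (p : Int)).toNat)
                    (e.getD ((j * k + (p : Int)).toNat) 0 + w)
     | none => e)
      = [(0, p), (1, p), (2, p)].foldl (pvStep k w seq) e := by
  have hidx : pvMarqueurIdx = PySem.Dict.mk [(0, 0), (1, 1), (9, 2)] := by rfl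
  rw [hidx]
  simp only [pvStep, List.foldl_cons, List.foldl_nil, pvAdd, PySem.Dict.get?_mk_cons, List.getD]
  generalize (seq[p]?).getD 0 = v
  by_cases h0 : v = 0
  · subst h0; norm_num
  · by_cases h1 : v = 1
    · subst h1; norm_num
    · by_cases h9 : v = 9
      · subst h9; norm_num
      · simp [h0, h1, h9, Ne.symm h0, Ne.symm h1, Ne.symm h9, beq_iff_eq, PySem.Dict.get?]

-- A's per-sequence triple loop = fold of pvStep over the marker-major pair list
lemma pvA_seq (k w : Int) (seq : List Int) (e : List Int) :
    (List.range pvALLmarqueurs.length).foldl (fun etat j =>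
      ((List.range k.toNat).foldl (fun st (p : Nat) =>
        (if seq.getD st.2 0 == pvALLmarqueurs.getD j 0 then
           st.1.set (((j : Int) * k + (p : Int)).toNat)
             (st.1.getD (((j : Int) * k + (p : Int)).toNat) 0 + w)
         else st.1,
         st.2 + 1)) (etat, 0)).1) e
      = (pvPairsA k.toNat).foldl (pvStep k w seq) e := by
  have h1 : ∀ (j : Nat) (e : List Int),
      ((List.range k.toNat).foldl (fun st (p : Nat) =>
        (if seq.getD st.2 0 == pvALLmarqueurs.getD j 0 then
           st.1.set (((j : Int) * k + (p : Int)).toNat)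
             (st.1.getD (((j : Int) * k + (p : Int)).toNat) 0 + w)
         else st.1,
         st.2 + 1)) (e, 0)).1
        = (List.range k.toNat).foldl (fun e' p => pvStep k w seq e' (j, p)) e := by
    intro j e
    rw [List.range_eq_range',
      pv_foldl_counter (fun (e' : List Int) (i p : Nat) =>
        if seq.getD i 0 == pvALLmarqueurs.getD j 0 then
          e'.set (((j : Int) * k + (p : Int)).toNat)
            (e'.getD (((j : Int) * k + (p : Int)).toNat) 0 + w)
        else e')]
    rfl
  simp only [h1]
  have h3 : pvALLmarqueurs.length = 3 := rfl
  rw [h3, pvPairsA, pv_foldl_flatMap]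
  simp only [List.foldl_map]

-- B's per-sequence loop = fold of pvStep over the position-major pair list
lemma pvB_seq (k w : Int) (seq : List Int) (e : List Int) :
    (List.range k.toNat).foldl (fun etat (p : Nat) =>
      match PySem.Dict.get? pvMarqueurIdx (seq.getD p 0) with
      | some j => etat.set ((j * k + (p : Int)).toNat)
                    (etat.getD ((j * k + (p : Int)).toNat) 0 + w)
      | none => etat) e
      = (pvPairsB k.toNat).foldl (pvStep k w seq) e := by
  rw [pvPairsB, pv_foldl_flatMap]
  exact PySem.List.foldl_congr_mem _ _ _ _ (fun acc p hp => pvB_pos k w seq acc p)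

-- ===== VERDICT (by name: the statement is the Claim_ definition above) =====
theorem Blocs1_spec : Claim_equal_Blocs1 := by
  intro dict k _ hpre
  unfold Spec_Blocs1
  show Blocs1 dict k = Blocs1_alt dict k
  obtain ⟨hnd, -⟩ := hpre
  simp only [Blocs1, Blocs1_alt]
  have hinit : (k * (([0, 1, 9] : List Int).length : Int)).toNat = k.toNat * pvALLmarqueurs.length := by
    simp only [pvALLmarqueurs, List.length_cons, List.length_nil]
    omega
  rw [hinit]
  apply PySem.List.foldl_congr_mem
  intro etat pr hm
  rw [pv_lookup_eq_of_nodup dict pr hnd hm]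
  rw [pvA_seq k pr.2 pr.1 etat, pvB_seq k pr.2 pr.1 etat]
  exact (pvPairs_perm k.toNat).foldl_eq
    (rcomm := ⟨pvStep_rightComm k pr.2 pr.1⟩) etat
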